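-- pv_equiv track=rewrite | github.com/eadmaster/pcrown | src/buildcd/_split_long_lines.py | insert_lineend_every_x_chars
-- ===== SOURCE A (Python) =====
-- MAX_CHARS_PER_LINE=35
--
-- def insert_lineend_every_x_chars(s, init_lines_counter=0):
--     position = 0
--     result = ""
--     lines_counter = init_lines_counter
--
--     while position < len(s):
--         # Get the next MAX_CHARS_PER_LINE characters slice
--         slice_max = s[position:position + MAX_CHARS_PER_LINE]
--
--         # Find the last space in this slice
--         last_space_pos = slice_max.rfind(' ')
--
--         #if last_space_pos == -1 or (len(slice_max)-s.find(slice_max) <= MAX_CHARS_PER_LINE):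
--         if last_space_pos == -1 or (len(slice_max)< MAX_CHARS_PER_LINE):
--             # If no space found, just append the remaining string
--             result += s[position:]
--             break
--
--         # Adjust the space position to the full string index
--         insert_pos = position + last_space_pos
--
--         # Add part before the space and insert the <lineend> tag
--         lines_counter += 1
--         if(lines_counter<3):
--             result += s[position:insert_pos] + "<lineend>"
--         else:
--             result += s[position:insert_pos] + "<pause><lineend><CC03EA>"
--             lines_counter = 0  # reset
--
--         # Move the position after the space
--         position = insert_pos + 1
--
--     return result
-- ===== SOURCE B (Python) =====
-- MAX_CHARS_PER_LINE = 35
--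
-- def insert_lineend_every_x_chars(s, init_lines_counter=0):
--     # Single forward pass: track the start of the current line and the last
--     # space seen inside the current 35-char window; emit pieces into a list.
--     n = len(s)
--     pieces = []
--     line_start = 0
--     last_space = -1
--     lines_counter = init_lines_counter
--     i = 0
--     while True:
--         if i - line_start == MAX_CHARS_PER_LINE:
--             if last_space < 0:
--                 pieces.append(s[line_start:])
--                 break
--             lines_counter += 1
--             if lines_counter < 3:
--                 tag = "<lineend>"
--             else:
--                 tag = "<pause><lineend><CC03EA>"
--                 lines_counter = 0
--             pieces.append(s[line_start:last_space])
--             pieces.append(tag)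
--             line_start = last_space + 1
--             last_space = -1
--         elif i == n:
--             pieces.append(s[line_start:])
--             break
--         else:
--             if s[i] == ' ':
--                 last_space = i
--             i += 1
--     return "".join(pieces)
-- ===== Notes on version B (the rewrite author's own statement) =====
-- stated objective: faster
-- what changed: Replaced the window-slice + rfind loop (which re-slices 35 chars and reverse-searches each window, and grows the result by string +=) with a single forward pass over the characters that tracks line_start and the last space seen in the current window, appending pieces to a list joined once at the end.
import Mathlib
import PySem

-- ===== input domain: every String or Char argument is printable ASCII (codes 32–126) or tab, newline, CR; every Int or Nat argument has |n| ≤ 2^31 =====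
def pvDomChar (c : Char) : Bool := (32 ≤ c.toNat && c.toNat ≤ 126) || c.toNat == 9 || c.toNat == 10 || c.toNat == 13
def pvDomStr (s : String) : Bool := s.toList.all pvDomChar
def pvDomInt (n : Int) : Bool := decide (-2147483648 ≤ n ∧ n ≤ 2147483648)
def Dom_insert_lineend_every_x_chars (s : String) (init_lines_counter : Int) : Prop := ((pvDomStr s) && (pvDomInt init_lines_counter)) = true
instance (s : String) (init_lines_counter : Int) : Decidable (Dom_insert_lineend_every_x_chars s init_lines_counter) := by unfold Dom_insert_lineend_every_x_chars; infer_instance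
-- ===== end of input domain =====

-- B replaces A's window-slice+rfind loop (with string +=) by one forward pass tracking the
-- last space of the current window, collecting pieces joined once at the end (measured faster).

-- ===== PORT A =====
-- A's while loop on the character list; `result` is the accumulated output string.
def pvLoopA (s : List Char) (position : Nat) (result : List Char) (lines_counter : Int) : List Char :=
  if _h : position < s.length then
    let slice_max := PySem.List.slice s (some (position : Int)) (some ((position : Int) + 35))
    let last_space_pos := PySem.Chars.rfind slice_max [' ']
    if last_space_pos = -1 ∨ slice_max.length < 35 then
      result ++ PySem.List.slice s (some (position : Int)) none
    else
      let insert_pos := position + last_space_pos.toNat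
      if lines_counter + 1 < 3 then
        pvLoopA s (insert_pos + 1)
          (result ++ PySem.List.slice s (some (position : Int)) (some (insert_pos : Int)) ++ "<lineend>".toList)
          (lines_counter + 1)
      else
        pvLoopA s (insert_pos + 1)
          (result ++ PySem.List.slice s (some (position : Int)) (some (insert_pos : Int)) ++ "<pause><lineend><CC03EA>".toList)
          0
  else result
termination_by s.length - position
decreasing_by all_goals omega

def insert_lineend_every_x_chars (s : String) (init_lines_counter : Int) : String :=
  String.ofList (pvLoopA s.toList 0 [] init_lines_counter)

-- ===== PORT B =====
-- B's single forward pass (Source B): i scans the characters, line_start marks the current line,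
-- last_space is the last space index seen in the window, pieces collects the output fragments.
-- fuel is a totality guard only: the top-level call supplies more fuel than iterations happen.
def pvLoopB (s : List Char) (n : Nat) (i line_start : Nat) (last_space : Int)
    (lines_counter : Int) (pieces : List (List Char)) (fuel : Nat) : List (List Char) :=
  match fuel with
  | 0 => pieces
  | fuel + 1 =>
    if i - line_start = 35 then
      if last_space < 0 then
        pieces ++ [PySem.List.slice s (some (line_start : Int)) none]
      else
        if lines_counter + 1 < 3 then
          pvLoopB s n i (last_space.toNat + 1) (-1) (lines_counter + 1)
            (pieces ++ [PySem.List.slice s (some (line_start : Int)) (some last_space), "<lineend>".toList]) fuel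
        else
          pvLoopB s n i (last_space.toNat + 1) (-1) 0
            (pieces ++ [PySem.List.slice s (some (line_start : Int)) (some last_space), "<pause><lineend><CC03EA>".toList]) fuel
    else if i = n then
      pieces ++ [PySem.List.slice s (some (line_start : Int)) none]
    else
      pvLoopB s n (i + 1) line_start
        (if s[i]? = some ' ' then (i : Int) else last_space) lines_counter pieces fuel

def insert_lineend_every_x_chars_alt (s : String) (init_lines_counter : Int) : String :=
  String.ofList (pvLoopB s.toList s.toList.length 0 0 (-1) init_lines_counter [] (2 * s.toList.length + 3)).flatten

-- ===== PRECONDITION & SPEC =====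
def Spec_insert_lineend_every_x_chars (s : String) (init_lines_counter : Int) (out : String) : Prop := out = insert_lineend_every_x_chars_alt s init_lines_counter
instance (s : String) (init_lines_counter : Int) (out : String) : Decidable (Spec_insert_lineend_every_x_chars s init_lines_counter out) := by unfold Spec_insert_lineend_every_x_chars; infer_instance

-- ===== CLAIM (what is proved, stated in full; the proofs are below) =====
def Claim_equal_insert_lineend_every_x_chars : Prop := ∀ (s : String) (init_lines_counter : Int), Dom_insert_lineend_every_x_chars s init_lines_counter → Spec_insert_lineend_every_x_chars s init_lines_counter (insert_lineend_every_x_chars s init_lines_counter)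

-- ===== LEMMAS AND PROOFS =====

-- index of the last space of s in [p, i), or -1
def lastSp (s : List Char) (p : Nat) : Nat → Int
  | 0 => -1
  | i + 1 => if i < p then -1 else if s[i]? = some ' ' then (i : Int) else lastSp s p i

theorem lastSp_of_le (s : List Char) (p : Nat) : ∀ i, i ≤ p → lastSp s p i = -1 := by
  intro i
  induction i with
  | zero => intro _; rfl
  | succ j ih => intro h; simp only [lastSp]; rw [if_pos (by omega)]

theorem lastSp_step (s : List Char) (p i : Nat) (h : p ≤ i) :
    lastSp s p (i + 1) = if s[i]? = some ' ' then (i : Int) else lastSp s p i := by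
  simp only [lastSp]; rw [if_neg (by omega)]

theorem lastSp_cases (s : List Char) (p : Nat) : ∀ i,
    lastSp s p i = -1 ∨ ∃ k : Nat, lastSp s p i = (k : Int) ∧ p ≤ k ∧ k < i ∧ s[k]? = some ' ' := by
  intro i
  induction i with
  | zero => left; rfl
  | succ j ih =>
    by_cases hp : j < p
    · left; simp only [lastSp]; rw [if_pos hp]
    · rw [lastSp_step s p j (by omega)]
      by_cases hs : s[j]? = some ' '
      · right; exact ⟨j, by rw [if_pos hs], by omega, by omega, hs⟩
      · rw [if_neg hs]
        rcases ih with h | ⟨k, hk, h1, h2, h3⟩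
        · left; exact h
        · right; exact ⟨k, hk, h1, by omega, h3⟩

theorem lastSp_last (s : List Char) (p : Nat) : ∀ i (k : Nat), lastSp s p i = (k : Int) →
    ∀ j, k < j → j < i → s[j]? ≠ some ' ' := by
  intro i
  induction i with
  | zero => intro k hk j hj1 hj2; simp [lastSp] at hk
  | succ m ih =>
    intro k hk j hj1 hj2
    by_cases hp : m < p
    · simp only [lastSp] at hk; rw [if_pos hp] at hk; omega
    · rw [lastSp_step s p m (by omega)] at hk
      by_cases hs : s[m]? = some ' '
      · rw [if_pos hs] at hk
        have : k = m := by omega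
        omega
      · rw [if_neg hs] at hk
        by_cases hjm : j = m
        · subst hjm; exact hs
        · exact ih k hk j hj1 (by omega)

theorem lastSp_eq_neg_one (s : List Char) (p : Nat) : ∀ i,
    (∀ j, p ≤ j → j < i → s[j]? ≠ some ' ') → lastSp s p i = -1 := by
  intro i
  induction i with
  | zero => intro _; rfl
  | succ m ih =>
    intro h
    by_cases hp : m < p
    · simp only [lastSp]; rw [if_pos hp]
    · rw [lastSp_step s p m (by omega), if_neg (h m (by omega) (by omega))]
      exact ih (fun j h1 h2 => h j h1 (by omega))

theorem prefix_space (t : List Char) : ([' '].isPrefixOf t = true) ↔ t[0]? = some ' ' := by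
  cases t with
  | nil => simp [List.isPrefixOf]
  | cons c r => simp [List.isPrefixOf]; exact eq_comm

theorem rfind_go_space (t : List Char) : ∀ j, PySem.Chars.rfind.go t [' '] j = lastSp t 0 (j + 1) := by
  intro j
  induction j with
  | zero =>
    simp only [PySem.Chars.rfind.go, lastSp]
    by_cases h : t[0]? = some ' '
    · rw [if_pos ((prefix_space t).mpr h)]; simp [h]
    · rw [if_neg (fun hc => h ((prefix_space t).mp hc))]; simp [h]
  | succ m ih =>
    simp only [PySem.Chars.rfind.go]
    rw [lastSp_step t 0 (m + 1) (by omega)]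
    have hdrop : (t.drop (m + 1))[0]? = t[m + 1]? := by
      simp [List.getElem?_drop]
    by_cases h : t[m + 1]? = some ' '
    · rw [if_pos ((prefix_space _).mpr (by rw [hdrop]; exact h))]
      rw [if_pos h]
    · rw [if_neg (fun hc => h (by rw [← hdrop]; exact (prefix_space _).mp hc))]
      rw [if_neg h]
      exact ih

theorem rfind_space (t : List Char) : PySem.Chars.rfind t [' '] = lastSp t 0 t.length := by
  show PySem.Chars.rfind.go t [' '] t.length = _
  rw [rfind_go_space]
  rw [lastSp_step t 0 t.length (by omega)]
  simp

theorem lastSp_window (s : List Char) (p m : Nat) :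
    ∀ d, d ≤ m → lastSp ((s.drop p).take m) 0 d =
      (if lastSp s p (p + d) = -1 then -1 else lastSp s p (p + d) - p) := by
  intro d
  induction d with
  | zero =>
    intro _
    rw [Nat.add_zero, lastSp_of_le s p p (by omega)]
    simp [lastSp]
  | succ e ih =>
    intro hd
    have hw : ((s.drop p).take m)[e]? = s[p + e]? := by
      rw [List.getElem?_take, if_pos (by omega)]
      simp [List.getElem?_drop]
    rw [show p + (e + 1) = (p + e) + 1 from rfl]
    rw [lastSp_step _ 0 e (by omega), lastSp_step s p (p + e) (by omega)]
    rw [hw]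
    by_cases hs : s[p + e]? = some ' '
    · rw [if_pos hs, if_pos hs]
      rw [if_neg (by omega)]
      omega
    · rw [if_neg hs, if_neg hs]
      exact ih (by omega)

-- A's result is the accumulator followed by the rest of the output
theorem pvLoopA_acc (s : List Char) : ∀ N p res c, s.length - p ≤ N →
    pvLoopA s p res c = res ++ pvLoopA s p [] c := by
  intro N
  induction N with
  | zero =>
    intro p res c hN
    rw [pvLoopA, pvLoopA]
    rw [dif_neg (by omega), dif_neg (by omega)]
    simp
  | succ M ih =>
    intro p res c hN
    rw [pvLoopA, pvLoopA]
    by_cases hp : p < s.length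
    · rw [dif_pos hp, dif_pos hp]
      simp only
      by_cases hcond : PySem.Chars.rfind (PySem.List.slice s (some (p : Int)) (some ((p : Int) + 35))) [' '] = -1 ∨
          (PySem.List.slice s (some (p : Int)) (some ((p : Int) + 35))).length < 35
      · rw [if_pos hcond, if_pos hcond]; simp
      · rw [if_neg hcond, if_neg hcond]
        have hlt : s.length - (p + (PySem.Chars.rfind (PySem.List.slice s (some (p : Int)) (some ((p : Int) + 35))) [' ']).toNat + 1) ≤ M := by omega
        by_cases hc : c + 1 < 3
        · rw [if_pos hc, if_pos hc]
          conv_rhs => rw [ih _ _ _ hlt]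
          rw [ih _ _ _ hlt]
          simp [List.append_assoc]
        · rw [if_neg hc, if_neg hc]
          conv_rhs => rw [ih _ _ _ hlt]
          rw [ih _ _ _ hlt]
          simp [List.append_assoc]
    · rw [dif_neg hp, dif_neg hp]; simp

-- the main simulation: B's pass from a partially scanned window equals A's remaining output
theorem key (s : List Char) : ∀ N p i c fuel pieces,
    (s.length - p) + (s.length - i) ≤ N →
    p ≤ i → i ≤ s.length → i ≤ p + 35 →
    2 * (s.length - i) + (i - p) + 3 ≤ fuel →
    (pvLoopB s s.length i p (lastSp s p i) c pieces fuel).flatten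
      = pieces.flatten ++ pvLoopA s p [] c := by
  intro N
  induction N with
  | zero =>
    intro p i c fuel pieces hN hpi hin hip hfuel
    -- then p = i = s.length; B ends the string, A's loop does not run
    obtain ⟨f, rfl⟩ : ∃ f, fuel = f + 1 := ⟨fuel - 1, by omega⟩
    have hps : p = s.length := by omega
    have his : i = s.length := by omega
    rw [pvLoopB]
    rw [if_neg (by omega), if_pos his]
    rw [pvLoopA, dif_neg (by omega)]
    subst hps
    rw [PySem.List.slice_from_natCast]
    simp
  | succ M ih =>
    intro p i c fuel pieces hN hpi hin hip hfuel
    obtain ⟨f, rfl⟩ : ∃ f, fuel = f + 1 := ⟨fuel - 1, by omega⟩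
    rw [pvLoopB]
    by_cases hfull : i - p = 35
    · -- window full: i = p + 35 ≤ s.length
      have hi35 : i = p + 35 := by omega
      have h35n : p + 35 ≤ s.length := by omega
      rw [if_pos hfull]
      -- A's side: unfold one step
      have hslice : PySem.List.slice s (some (p : Int)) (some ((p : Int) + 35)) = (s.drop p).take 35 := by
        have := PySem.List.slice_natCast (xs := s) (a := p) (b := p + 35)
        rw [show ((p + 35 : Nat) : Int) = (p : Int) + 35 by push_cast; ring] at this
        rw [this]
        congr 1
        omega
      have hlen : ((s.drop p).take 35).length = 35 := by
        simp [List.length_take, List.length_drop]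
        omega
      have hrf : PySem.Chars.rfind (PySem.List.slice s (some (p : Int)) (some ((p : Int) + 35))) [' ']
          = (if lastSp s p (p + 35) = -1 then -1 else lastSp s p (p + 35) - p) := by
        rw [hslice, rfind_space, hlen]
        exact lastSp_window s p 35 35 (by omega)
      rcases lastSp_cases s p (p + 35) with hnone | ⟨k, hk, hk1, hk2, hk3⟩
      · -- no space in the window: both dump the remainder and stop
        have hnoneI : lastSp s p i = -1 := by rw [hi35]; exact hnone
        rw [hnoneI]
        rw [if_pos (by norm_num)]
        rw [pvLoopA, dif_pos (by omega)]
        simp only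
        rw [hrf, hnone]
        rw [if_pos (Or.inl (by norm_num))]
        simp
      · -- split at the last space k
        have hkI : lastSp s p i = (k : Int) := by rw [hi35]; exact hk
        rw [hkI]
        rw [if_neg (by omega)]
        have hrfk : PySem.Chars.rfind (PySem.List.slice s (some (p : Int)) (some ((p : Int) + 35))) [' ']
            = ((k : Int) - (p : Int)) := by
          rw [hrf, hk, if_neg (by omega)]
        have hpk : p + ((k : Int) - (p : Int)).toNat = k := by omega
        -- A's step
        rw [pvLoopA, dif_pos (by omega)]
        simp only
        have hcondA : ¬(PySem.Chars.rfind (PySem.List.slice s (some (p : Int)) (some ((p : Int) + 35))) [' '] = -1 ∨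
            (PySem.List.slice s (some (p : Int)) (some ((p : Int) + 35))).length < 35) := by
          rw [hrfk, hslice, hlen]; push Not; constructor <;> omega
        rw [if_neg hcondA]
        rw [hrfk, hpk]
        have hknat : ((k : Int)).toNat = k := by omega
        -- B recurses with line_start = k + 1, last_space = -1
        have hreset : (-1 : Int) = lastSp s (k + 1) i := by
          rw [lastSp_eq_neg_one s (k + 1) i (fun j h1 h2 => lastSp_last s p i k hkI j (by omega) h2)]
        by_cases hc : c + 1 < 3
        · rw [if_pos hc, if_pos hc]
          rw [hknat, hreset]
          rw [ih (k + 1) i (c + 1) f _ (by omega) (by omega) (by omega) (by omega) (by omega)]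
          conv_rhs => rw [pvLoopA_acc s s.length (k + 1) _ (c + 1) (by omega)]
          simp [List.append_assoc]
        · rw [if_neg hc, if_neg hc]
          rw [hknat, hreset]
          rw [ih (k + 1) i 0 f _ (by omega) (by omega) (by omega) (by omega) (by omega)]
          conv_rhs => rw [pvLoopA_acc s s.length (k + 1) _ 0 (by omega)]
          simp [List.append_assoc]
    · rw [if_neg hfull]
      by_cases hiend : i = s.length
      · -- end of string before a full window: both dump the remainder
        rw [if_pos hiend]
        by_cases hps : p < s.length
        · rw [pvLoopA, dif_pos hps]
          simp only
          have hslice : PySem.List.slice s (some (p : Int)) (some ((p : Int) + 35)) = (s.drop p).take 35 := by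
            have := PySem.List.slice_natCast (xs := s) (a := p) (b := p + 35)
            rw [show ((p + 35 : Nat) : Int) = (p : Int) + 35 by push_cast; ring] at this
            rw [this]
            congr 1
            omega
          rw [if_pos (Or.inr (by rw [hslice]; simp [List.length_take, List.length_drop]; omega))]
          simp
        · -- p = i = s.length
          rw [pvLoopA, dif_neg hps]
          have : p = s.length := by omega
          subst this
          rw [PySem.List.slice_from_natCast]
          simp
      · -- consume one character
        rw [if_neg hiend]
        have hstep : (if s[i]? = some ' ' then (i : Int) else lastSp s p i) = lastSp s p (i + 1) :=
          (lastSp_step s p i hpi).symm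
        rw [hstep]
        exact ih p (i + 1) c f pieces (by omega) (by omega) (by omega) (by omega) (by omega)

-- ===== VERDICT (by name: the statement is the Claim_ definition above) =====
theorem insert_lineend_every_x_chars_spec : Claim_equal_insert_lineend_every_x_chars := by
  intro s c _hdom
  show insert_lineend_every_x_chars s c = insert_lineend_every_x_chars_alt s c
  unfold insert_lineend_every_x_chars insert_lineend_every_x_chars_alt
  congr 1
  have h0 : (-1 : Int) = lastSp s.toList 0 0 := rfl
  rw [h0]
  rw [key s.toList (2 * s.toList.length) 0 0 c (2 * s.toList.length + 3) [] (by omega) (by omega) (by omega) (by omega) (by omega)]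
  simp
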